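-- pv_equiv track=rewrite | github.com/lramirez89/proyectos_finalizados | materias_computacion/IntrCompBiologos/Talleres/MiniTaller2/mini2.py | unirProlijor
-- ===== SOURCE A (Python) =====
-- def unirProlijor(lis1,lis2):
-- 	if len(lis1)==0 and len(lis2)==0:
-- 		res= []
-- 	elif len(lis2)==0 or (len(lis1)>0 and lis1[len(lis1)-1]<lis2[len(lis2)-1]):
-- 		res= unirProlijor(lis1[:len(lis1)-1],lis2)
-- 		res.append(lis1[len(lis1)-1])
-- 	else:
-- 		res= unirProlijor(lis1,lis2[:len(lis2)-1])
-- 		res.append(lis2[len(lis2)-1])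
-- 	return res
-- ===== SOURCE B (Python) =====
-- def unirProlijor(lis1, lis2):
--     # Two-pointer iteration from the back, same comparison/append order as the
--     # recursive original, then one reversal: O(n) instead of O(n^2) slicing.
--     i, j = len(lis1), len(lis2)
--     out = []
--     while i > 0 or j > 0:
--         if j == 0 or (i > 0 and lis1[i - 1] < lis2[j - 1]):
--             out.append(lis1[i - 1])
--             i -= 1
--         else:
--             out.append(lis2[j - 1])
--             j -= 1
--     return out[::-1]
-- ===== Notes on version B (the rewrite author's own statement) =====
-- stated objective: faster
-- what changed: Replaced the recursion that copies a list slice at every step with an iterative two-pointer scan from the back that only moves indices, reversing the collected output once at the end.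
import Mathlib
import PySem

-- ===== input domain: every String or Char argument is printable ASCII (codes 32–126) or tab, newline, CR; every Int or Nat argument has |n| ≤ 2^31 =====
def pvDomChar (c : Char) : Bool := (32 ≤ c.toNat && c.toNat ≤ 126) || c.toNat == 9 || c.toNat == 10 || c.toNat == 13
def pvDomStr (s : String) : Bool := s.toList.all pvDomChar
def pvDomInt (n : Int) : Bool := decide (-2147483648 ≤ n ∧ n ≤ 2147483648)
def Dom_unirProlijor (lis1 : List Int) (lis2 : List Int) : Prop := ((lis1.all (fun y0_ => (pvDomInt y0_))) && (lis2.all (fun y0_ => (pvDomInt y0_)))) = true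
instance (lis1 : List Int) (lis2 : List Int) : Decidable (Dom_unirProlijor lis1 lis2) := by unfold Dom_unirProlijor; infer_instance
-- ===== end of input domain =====

-- B replaces A's recursion over list slices by an iterative two-pointer scan
-- from the back with one final reversal (faster: no per-step slice copies).

-- ===== PORT A =====
-- literal port of A's recursion; lis1[len-1] / lis2[len-1] use pyGetD with
-- default 0, exact because each branch guarantees the indexed list is nonempty.
def unirProlijor (lis1 : List Int) (lis2 : List Int) : List Int :=
  if h0 : lis1.length = 0 ∧ lis2.length = 0 then
    []
  else if h1 : lis2.length = 0 ∨ (0 < lis1.length ∧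
      PySem.List.pyGetD lis1 ((lis1.length : Int) - 1) 0 <
      PySem.List.pyGetD lis2 ((lis2.length : Int) - 1) 0) then
    unirProlijor (PySem.List.slice lis1 none (some ((lis1.length : Int) - 1))) lis2
      ++ [PySem.List.pyGetD lis1 ((lis1.length : Int) - 1) 0]
  else
    unirProlijor lis1 (PySem.List.slice lis2 none (some ((lis2.length : Int) - 1)))
      ++ [PySem.List.pyGetD lis2 ((lis2.length : Int) - 1) 0]
termination_by lis1.length + lis2.length
decreasing_by
  · have hl1 : 0 < lis1.length := by
      rcases h1 with h | h
      · omega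
      · exact h.1
    have hidx : ((lis1.length : Int) - 1) = ((lis1.length - 1 : Nat) : Int) := by omega
    rw [hidx, PySem.List.slice_to_natCast]
    simp [List.length_take]
    omega
  · have hl2 : 0 < lis2.length := by
      have : lis2.length ≠ 0 := fun h => h1 (Or.inl h)
      omega
    have hidx : ((lis2.length : Int) - 1) = ((lis2.length - 1 : Nat) : Int) := by omega
    rw [hidx, PySem.List.slice_to_natCast]
    simp [List.length_take]
    omega

-- ===== PORT B =====
-- literal port of Source B's while loop: state (i, j, out), out appended at the
-- back each step, reversed once at the end (out[::-1]).
def unirAltGo (lis1 : List Int) (lis2 : List Int) (i j : Nat) (out : List Int) : List Int :=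
  if i = 0 ∧ j = 0 then
    out
  else if j = 0 ∨ (0 < i ∧
      PySem.List.pyGetD lis1 ((i : Int) - 1) 0 < PySem.List.pyGetD lis2 ((j : Int) - 1) 0) then
    unirAltGo lis1 lis2 (i - 1) j (out ++ [PySem.List.pyGetD lis1 ((i : Int) - 1) 0])
  else
    unirAltGo lis1 lis2 i (j - 1) (out ++ [PySem.List.pyGetD lis2 ((j : Int) - 1) 0])
termination_by i + j
decreasing_by
  · rename_i h0 h1
    rcases h1 with h | h
    · omega
    · rcases h with ⟨hi, _⟩
      omega
  · rename_i h0 h1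
    have : j ≠ 0 := fun hj => h1 (Or.inl hj)
    omega

def unirProlijor_alt (lis1 : List Int) (lis2 : List Int) : List Int :=
  (unirAltGo lis1 lis2 lis1.length lis2.length []).reverse

-- ===== PRECONDITION & SPEC =====
def Spec_unirProlijor (lis1 : List Int) (lis2 : List Int) (out : List Int) : Prop := out = unirProlijor_alt lis1 lis2
instance (lis1 : List Int) (lis2 : List Int) (out : List Int) : Decidable (Spec_unirProlijor lis1 lis2 out) := by unfold Spec_unirProlijor; infer_instance

-- ===== CLAIM (what is proved, stated in full; the proofs are below) =====
def Claim_equal_unirProlijor : Prop := ∀ (lis1 : List Int) (lis2 : List Int), Dom_unirProlijor lis1 lis2 → Spec_unirProlijor lis1 lis2 (unirProlijor lis1 lis2)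

-- ===== LEMMAS AND PROOFS =====

-- indexing a take-prefix at its last position hits the original list
lemma pyGetD_take_pred (l : List Int) (i : Nat) (hi0 : 0 < i) (hi : i ≤ l.length) :
    PySem.List.pyGetD (l.take i) ((i : Int) - 1) 0 = PySem.List.pyGetD l ((i : Int) - 1) 0 := by
  have hidx : ((i : Int) - 1) = ((i - 1 : Nat) : Int) := by omega
  rw [hidx, PySem.List.pyGetD_natCast, PySem.List.pyGetD_natCast,
      List.getD_eq_getElem?_getD, List.getD_eq_getElem?_getD, List.getElem?_take]
  simp [Nat.sub_lt hi0]

-- A's slice of a take-prefix drops just the last kept element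
lemma slice_take_pred (l : List Int) (i : Nat) (hi0 : 0 < i) :
    PySem.List.slice (l.take i) none (some ((i : Int) - 1)) = l.take (i - 1) := by
  have hidx : ((i : Int) - 1) = ((i - 1 : Nat) : Int) := by omega
  rw [hidx, PySem.List.slice_to_natCast, List.take_take]
  congr 1
  omega

-- loop invariant: the iterative merge extends `out` with the reversal of
-- A's result on the still-unprocessed prefixes
lemma unirAltGo_spec (l1 l2 : List Int) :
    ∀ (n i j : Nat) (out : List Int), i + j ≤ n → i ≤ l1.length → j ≤ l2.length →
      unirAltGo l1 l2 i j out = out ++ (unirProlijor (l1.take i) (l2.take j)).reverse := by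
  intro n
  induction n with
  | zero =>
    intro i j out hn hi hj
    have hi0 : i = 0 := by omega
    have hj0 : j = 0 := by omega
    subst hi0; subst hj0
    rw [unirAltGo, unirProlijor.eq_def]
    simp
  | succ n ih =>
    intro i j out hn hi hj
    have hlen1 : (l1.take i).length = i := by simp; omega
    have hlen2 : (l2.take j).length = j := by simp; omega
    by_cases h0 : i = 0 ∧ j = 0
    · rw [unirAltGo, unirProlijor.eq_def, if_pos h0, dif_pos (by rw [hlen1, hlen2]; exact h0)]
      simp
    · by_cases hc : j = 0 ∨ (0 < i ∧
          PySem.List.pyGetD l1 ((i : Int) - 1) 0 < PySem.List.pyGetD l2 ((j : Int) - 1) 0)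
      · -- take from lis1
        have hi0 : 0 < i := by
          rcases hc with h | h
          · omega
          · exact h.1
        have hA : unirProlijor (l1.take i) (l2.take j)
            = unirProlijor (l1.take (i - 1)) (l2.take j)
              ++ [PySem.List.pyGetD l1 ((i : Int) - 1) 0] := by
          rw [unirProlijor.eq_def]
          rw [dif_neg (by rw [hlen1, hlen2]; exact h0)]
          rw [dif_pos (by
            rw [hlen1, hlen2]
            rcases hc with h | h
            · exact Or.inl h
            · by_cases hj0 : j = 0
              · exact Or.inl hj0
              · exact Or.inr ⟨hi0, by
                  rw [pyGetD_take_pred l1 i hi0 hi,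
                      pyGetD_take_pred l2 j (Nat.pos_of_ne_zero hj0) hj]
                  exact h.2⟩)]
          rw [hlen1, slice_take_pred l1 i hi0, pyGetD_take_pred l1 i hi0 hi]
        rw [unirAltGo, if_neg h0, if_pos hc,
            ih (i - 1) j _ (by omega) (by omega) hj, hA]
        simp
      · -- take from lis2
        have hj0 : 0 < j := by
          have : j ≠ 0 := fun hj => hc (Or.inl hj)
          omega
        have hA : unirProlijor (l1.take i) (l2.take j)
            = unirProlijor (l1.take i) (l2.take (j - 1))
              ++ [PySem.List.pyGetD l2 ((j : Int) - 1) 0] := by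
          rw [unirProlijor.eq_def]
          rw [dif_neg (by rw [hlen1, hlen2]; exact h0)]
          rw [dif_neg (by
            rw [hlen1, hlen2]
            intro h
            apply hc
            rcases h with h | h
            · exact Or.inl h
            · refine Or.inr ⟨h.1, ?_⟩
              rw [pyGetD_take_pred l1 i h.1 hi, pyGetD_take_pred l2 j hj0 hj] at h
              exact h.2)]
          rw [hlen2, slice_take_pred l2 j hj0, pyGetD_take_pred l2 j hj0 hj]
        rw [unirAltGo, if_neg h0, if_neg hc,
            ih i (j - 1) _ (by omega) hi (by omega), hA]
        simp

-- ===== VERDICT (by name: the statement is the Claim_ definition above) =====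
theorem unirProlijor_spec : Claim_equal_unirProlijor := by
  intro l1 l2 _
  unfold Spec_unirProlijor unirProlijor_alt
  rw [unirAltGo_spec l1 l2 (l1.length + l2.length) l1.length l2.length [] le_rfl le_rfl le_rfl]
  simp
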